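-- pv_equiv track=rewrite | github.com/YoungwookKang/coding-test | 1767.py | can_do
-- ===== SOURCE A (Python) =====
-- dx = [-1, 1, 0, 0]
--
-- dy = [0, 0, -1, 1]
--
-- def can_do(board, x, y, d, n):
--     wires = []
--     nx, ny = x + dx[d], y + dy[d]
--     while True:
--         if 0 > nx or n <= nx or 0 > ny or n <= ny:
--             break
--         if board[nx][ny] != 0:
--             return False, []
--         wires.append((nx, ny))
--         nx, ny = nx + dx[d], ny + dy[d]
--
--     return True, wires
-- ===== SOURCE B (Python) =====
-- DIRS = [(-1, 0), (1, 0), (0, -1), (0, 1)]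
--
-- def _ray_len(c, dv, n):
--     # closed form: number of k >= 1 with 0 <= c + k*dv < n (a contiguous prefix, |dv| == 1)
--     if dv == 1:
--         return n - 1 - c if 0 <= c + 1 < n else 0
--     else:
--         return c if 0 <= c - 1 < n else 0
--
-- def can_do(board, x, y, d, n):
--     dxv, dyv = DIRS[d]
--     # closed-form geometry: length of the in-bounds ray, no stepping loop
--     if dxv != 0:
--         m = _ray_len(x, dxv, n) if 0 <= y < n else 0
--     else:
--         m = _ray_len(y, dyv, n) if 0 <= x < n else 0
--     wires = [(x + k * dxv, y + k * dyv) for k in range(1, m + 1)]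
--     # lazy validation: first obstacle (if any) kills the whole ray
--     if any(board[i][j] != 0 for i, j in wires):
--         return False, []
--     return True, wires
-- ===== Notes on version B (the rewrite author's own statement) =====
-- stated objective: alternative
-- what changed: B replaces A's stepping while-loop (advance one cell, bounds-test, check, append) by a closed-form arithmetic computation of the ray length, a comprehension that materialises the wires from that formula, and a lazy any()-scan for the first obstacle; no coordinate-stepping loop remains.
import Mathlib
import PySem

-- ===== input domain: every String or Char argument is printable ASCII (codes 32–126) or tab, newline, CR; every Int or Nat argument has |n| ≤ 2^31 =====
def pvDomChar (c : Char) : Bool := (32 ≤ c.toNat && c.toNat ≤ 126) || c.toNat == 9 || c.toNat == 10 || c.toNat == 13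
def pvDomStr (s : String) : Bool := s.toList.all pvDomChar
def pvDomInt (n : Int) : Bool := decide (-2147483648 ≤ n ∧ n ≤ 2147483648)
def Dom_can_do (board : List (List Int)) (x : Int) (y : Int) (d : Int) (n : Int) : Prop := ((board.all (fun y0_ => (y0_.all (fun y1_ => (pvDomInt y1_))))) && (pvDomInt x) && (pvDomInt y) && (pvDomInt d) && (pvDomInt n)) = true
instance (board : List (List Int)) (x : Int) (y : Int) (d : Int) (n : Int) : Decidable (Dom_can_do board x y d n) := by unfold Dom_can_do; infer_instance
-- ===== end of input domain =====

-- B replaces A's stepping walk by a closed-form ray length, a mapped range building the wires,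
-- and a lazy any()-validation; alternative decomposition, same cost; return-value equivalence only.

-- ===== PORT A =====
-- module constants dx, dy
def pvDx : List Int := [-1, 1, 0, 0]
def pvDy : List Int := [0, 0, -1, 1]

-- board[i][j] (Python raises when out of extent; such inputs are outside Pre_, default 0 is unreachable there)
def pvCell (board : List (List Int)) (i j : Int) : Int :=
  ((PySem.List.pyGet? board i).bind (fun row => PySem.List.pyGet? row j)).getD 0

-- the 'while True' loop of A: state (nx, ny, wires); fuel n.toNat+1 bounds the iterations
-- (the moving coordinate takes distinct values of [0, n) during body executions)
def pvLoopA (fuel : Nat) (board : List (List Int)) (n dxv dyv nx ny : Int)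
    (wires : List (Int × Int)) : Bool × (List (Int × Int)) :=
  match fuel with
  | 0 => (true, wires)
  | f + 1 =>
    if 0 > nx ∨ n ≤ nx ∨ 0 > ny ∨ n ≤ ny then (true, wires)
    else if pvCell board nx ny ≠ 0 then (false, [])
    else pvLoopA f board n dxv dyv (nx + dxv) (ny + dyv) (wires ++ [(nx, ny)])

def can_do (board : List (List Int)) (x : Int) (y : Int) (d : Int) (n : Int) : Bool × (List (Int × Int)) :=
  match PySem.List.pyGet? pvDx d, PySem.List.pyGet? pvDy d with
  | some dxv, some dyv => pvLoopA (n.toNat + 1) board n dxv dyv (x + dxv) (y + dyv) []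
  | _, _ => (false, [])  -- Python raises IndexError here; outside Pre_

-- ===== PORT B =====
-- B's module constant DIRS
def pvDirsB : List (Int × Int) := [(-1, 0), (1, 0), (0, -1), (0, 1)]

-- board[i][j] for B (same Python expression, totalized through pyGetD; under Pre_ every
-- cell B's any()-scan reaches before the first obstacle is present, so the defaults are unreachable)
def pvCellB (board : List (List Int)) (i j : Int) : Int :=
  PySem.List.pyGetD (PySem.List.pyGetD board i []) j 0

-- _ray_len(c, dv, n): closed form, number of k >= 1 with 0 <= c + k*dv < n
def pvRayLenB (c dv n : Int) : Int :=
  if dv = 1 then (if 0 ≤ c + 1 ∧ c + 1 < n then n - 1 - c else 0)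
  else (if 0 ≤ c - 1 ∧ c - 1 < n then c else 0)

def can_do_alt (board : List (List Int)) (x : Int) (y : Int) (d : Int) (n : Int) : Bool × (List (Int × Int)) :=
  match PySem.List.pyGet? pvDirsB d with
  | some (dxv, dyv) =>
    let m := if dxv ≠ 0 then (if 0 ≤ y ∧ y < n then pvRayLenB x dxv n else 0)
             else (if 0 ≤ x ∧ x < n then pvRayLenB y dyv n else 0)
    let wires := (PySem.List.pyRange 1 (m + 1) 1).map (fun k => (x + k * dxv, y + k * dyv))
    if wires.any (fun p => pvCellB board p.1 p.2 != 0) then (false, [])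
    else (true, wires)
  | none => (false, [])  -- Python raises IndexError here; outside Pre_

-- ===== PRECONDITION & SPEC =====
-- Pre_'s own copies of the direction table, ray length and cell lookup (closed-form, port-independent)
def pvPreDx (d : Int) : Int := if d = 0 ∨ d = -4 then -1 else if d = 1 ∨ d = -3 then 1 else 0
def pvPreDy (d : Int) : Int := if d = 2 ∨ d = -2 then -1 else if d = 3 ∨ d = -1 then 1 else 0
def pvPreLen (x y d n : Int) : Int :=
  if pvPreDx d ≠ 0 then
    (if 0 ≤ y ∧ y < n then
      (if pvPreDx d = 1 then (if 0 ≤ x + 1 ∧ x + 1 < n then n - 1 - x else 0)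
       else (if 0 ≤ x - 1 ∧ x - 1 < n then x else 0)) else 0)
  else
    (if 0 ≤ x ∧ x < n then
      (if pvPreDy d = 1 then (if 0 ≤ y + 1 ∧ y + 1 < n then n - 1 - y else 0)
       else (if 0 ≤ y - 1 ∧ y - 1 < n then y else 0)) else 0)
def pvPreCell? (board : List (List Int)) (i j : Int) : Option Int :=
  (PySem.List.pyGet? board i).bind (fun row => PySem.List.pyGet? row j)

-- Pre_ excludes exactly the inputs on which A raises IndexError: d outside [-4, 4) (dx[d]/dy[d] raise),
-- and boards where the walk, before meeting any obstacle, reaches an in-bounds ray cell missing from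
-- the board's extent (board[nx][ny] raises). On every other input A returns and B matches it.
def Pre_can_do (board : List (List Int)) (x : Int) (y : Int) (d : Int) (n : Int) : Prop :=
  (-4 ≤ d ∧ d < 4) ∧
  ∀ k ∈ List.range (pvPreLen x y d n).toNat,
    (∀ l ∈ List.range k,
      pvPreCell? board (x + ((l : Int) + 1) * pvPreDx d) (y + ((l : Int) + 1) * pvPreDy d) = some 0) →
    (pvPreCell? board (x + ((k : Int) + 1) * pvPreDx d) (y + ((k : Int) + 1) * pvPreDy d)).isSome
instance (board : List (List Int)) (x : Int) (y : Int) (d : Int) (n : Int) : Decidable (Pre_can_do board x y d n) := by unfold Pre_can_do; infer_instance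

def pvWitness_can_do : List (List Int) × Int × Int × Int × Int := ([[0, 0], [0, 1]], 0, 0, 1, 2)

def Spec_can_do (board : List (List Int)) (x : Int) (y : Int) (d : Int) (n : Int) (out : Bool × (List (Int × Int))) : Prop := out = can_do_alt board x y d n
instance (board : List (List Int)) (x : Int) (y : Int) (d : Int) (n : Int) (out : Bool × (List (Int × Int))) : Decidable (Spec_can_do board x y d n out) := by unfold Spec_can_do; infer_instance

-- ===== CLAIM (what is proved, stated in full; the proofs are below) =====
def Claim_equal_can_do : Prop := ∀ (board : List (List Int)) (x : Int) (y : Int) (d : Int) (n : Int), Dom_can_do board x y d n → Pre_can_do board x y d n → Spec_can_do board x y d n (can_do board x y d n)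

-- ===== LEMMAS AND PROOFS =====

-- the geometric ray (proof-only device linking the two ports)
def pvPath (fuel : Nat) (n dxv dyv nx ny : Int) : List (Int × Int) :=
  match fuel with
  | 0 => []
  | f + 1 =>
    if 0 ≤ nx ∧ nx < n ∧ 0 ≤ ny ∧ ny < n then
      (nx, ny) :: pvPath f n dxv dyv (nx + dxv) (ny + dyv)
    else []

lemma pvPath_nil (fuel : Nat) (n dxv dyv nx ny : Int)
    (h : ¬ (0 ≤ nx ∧ nx < n ∧ 0 ≤ ny ∧ ny < n)) :
    pvPath fuel n dxv dyv nx ny = [] := by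
  cases fuel with
  | zero => rfl
  | succ f => simp [pvPath, h]

-- the two totalized cell lookups agree everywhere
lemma pvCellB_eq (board : List (List Int)) (i j : Int) :
    pvCellB board i j = pvCell board i j := by
  unfold pvCellB pvCell
  have k1 : PySem.List.pyGetD board i [] = (PySem.List.pyGet? board i).getD [] := by
    simp [PySem.List.pyGetD, PySem.List.pyGet?]
  have k2 : ∀ row : List Int, PySem.List.pyGetD row j 0 = (PySem.List.pyGet? row j).getD 0 := by
    intro row; simp [PySem.List.pyGetD, PySem.List.pyGet?]
  rw [k1, k2]
  cases h : PySem.List.pyGet? board i with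
  | none =>
    have h3 : PySem.List.pyGet? ([] : List Int) j = none := by
      simp [PySem.List.pyGet?, PySem.List.pyIdx?]
      try omega
    simp [h3]
  | some row => simp

-- A's interleaved loop equals a check over the geometric ray, at every fuel
lemma pvLoopA_eq_path (board : List (List Int)) (n dxv dyv : Int) :
    ∀ (fuel : Nat) (nx ny : Int) (wires : List (Int × Int)),
      pvLoopA fuel board n dxv dyv nx ny wires =
        (if (pvPath fuel n dxv dyv nx ny).all (fun p => pvCellB board p.1 p.2 == 0) then
          (true, wires ++ pvPath fuel n dxv dyv nx ny)
        else (false, [])) := by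
  intro fuel
  induction fuel with
  | zero => intro nx ny wires; simp [pvLoopA, pvPath]
  | succ f ih =>
    intro nx ny wires
    rw [pvLoopA, pvPath]
    by_cases hb : 0 > nx ∨ n ≤ nx ∨ 0 > ny ∨ n ≤ ny
    · have hb' : ¬ (0 ≤ nx ∧ nx < n ∧ 0 ≤ ny ∧ ny < n) := by omega
      simp [hb, hb']
    · have hb' : 0 ≤ nx ∧ nx < n ∧ 0 ≤ ny ∧ ny < n := by omega
      have hcc : pvCellB board nx ny = pvCell board nx ny := pvCellB_eq board nx ny
      by_cases hc : pvCell board nx ny = 0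
      · rw [if_neg hb, if_pos hb', if_neg (by simp [hc]), ih]
        by_cases hall : (pvPath f n dxv dyv (nx + dxv) (ny + dyv)).all
            (fun p => pvCellB board p.1 p.2 == 0) = true
        · simp [hall, hcc, hc]
        · simp [hall, hcc, hc]
      · simp [hb, hb', hcc, hc]

-- closed forms of the geometric ray, one per direction (moving coordinate, unit step)
lemma pvPath_right (n x : Int) (hx : 0 ≤ x ∧ x < n) :
    ∀ (fuel : Nat) (c : Int), 0 ≤ c → (n - c).toNat ≤ fuel →
      pvPath fuel n 0 1 x c = (List.range (n - c).toNat).map (fun k : Nat => (x, c + (k : Int))) := by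
  intro fuel
  induction fuel with
  | zero =>
    intro c hc hf
    have h0 : (n - c).toNat = 0 := by omega
    simp [pvPath, h0]
  | succ f ih =>
    intro c hc hf
    by_cases hcn : c < n
    · rw [pvPath, if_pos ⟨hx.1, hx.2, hc, hcn⟩]
      have hx0 : x + 0 = x := by ring
      rw [hx0, ih (c + 1) (by omega) (by omega)]
      have h1 : (n - c).toNat = (n - (c + 1)).toNat + 1 := by omega
      rw [h1, List.range_succ_eq_map, List.map_cons, List.map_map]
      congr 1
      · norm_num
      · apply List.map_congr_left; intro k _; simp [Function.comp]; try omega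
    · rw [pvPath_nil _ _ _ _ _ _ (by omega)]
      have h0 : (n - c).toNat = 0 := by omega
      simp [h0]

lemma pvPath_left (n x : Int) (hx : 0 ≤ x ∧ x < n) :
    ∀ (fuel : Nat) (c : Int), c < n → (c + 1).toNat ≤ fuel →
      pvPath fuel n 0 (-1) x c = (List.range (c + 1).toNat).map (fun k : Nat => (x, c - (k : Int))) := by
  intro fuel
  induction fuel with
  | zero =>
    intro c hc hf
    have h0 : (c + 1).toNat = 0 := by omega
    simp [pvPath, h0]
  | succ f ih =>
    intro c hc hf
    by_cases hc0 : 0 ≤ c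
    · rw [pvPath, if_pos ⟨hx.1, hx.2, hc0, hc⟩]
      have hx0 : x + 0 = x := by ring
      have hm1 : c + -1 = c - 1 := by ring
      rw [hx0, hm1, ih (c - 1) (by omega) (by omega)]
      have h1 : (c + 1).toNat = ((c - 1) + 1).toNat + 1 := by omega
      rw [h1, List.range_succ_eq_map, List.map_cons, List.map_map]
      congr 1
      · norm_num
      · apply List.map_congr_left; intro k _; simp [Function.comp]; try omega
    · rw [pvPath_nil _ _ _ _ _ _ (by omega)]
      have h0 : (c + 1).toNat = 0 := by omega
      simp [h0]

lemma pvPath_down (n y : Int) (hy : 0 ≤ y ∧ y < n) :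
    ∀ (fuel : Nat) (c : Int), 0 ≤ c → (n - c).toNat ≤ fuel →
      pvPath fuel n 1 0 c y = (List.range (n - c).toNat).map (fun k : Nat => (c + (k : Int), y)) := by
  intro fuel
  induction fuel with
  | zero =>
    intro c hc hf
    have h0 : (n - c).toNat = 0 := by omega
    simp [pvPath, h0]
  | succ f ih =>
    intro c hc hf
    by_cases hcn : c < n
    · rw [pvPath, if_pos ⟨hc, hcn, hy.1, hy.2⟩]
      have hy0 : y + 0 = y := by ring
      rw [hy0, ih (c + 1) (by omega) (by omega)]
      have h1 : (n - c).toNat = (n - (c + 1)).toNat + 1 := by omega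
      rw [h1, List.range_succ_eq_map, List.map_cons, List.map_map]
      congr 1
      · norm_num
      · apply List.map_congr_left; intro k _; simp [Function.comp]; try omega
    · rw [pvPath_nil _ _ _ _ _ _ (by omega)]
      have h0 : (n - c).toNat = 0 := by omega
      simp [h0]

lemma pvPath_up (n y : Int) (hy : 0 ≤ y ∧ y < n) :
    ∀ (fuel : Nat) (c : Int), c < n → (c + 1).toNat ≤ fuel →
      pvPath fuel n (-1) 0 c y = (List.range (c + 1).toNat).map (fun k : Nat => (c - (k : Int), y)) := by
  intro fuel
  induction fuel with
  | zero =>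
    intro c hc hf
    have h0 : (c + 1).toNat = 0 := by omega
    simp [pvPath, h0]
  | succ f ih =>
    intro c hc hf
    by_cases hc0 : 0 ≤ c
    · rw [pvPath, if_pos ⟨hc0, hc, hy.1, hy.2⟩]
      have hy0 : y + 0 = y := by ring
      have hm1 : c + -1 = c - 1 := by ring
      rw [hy0, hm1, ih (c - 1) (by omega) (by omega)]
      have h1 : (c + 1).toNat = ((c - 1) + 1).toNat + 1 := by omega
      rw [h1, List.range_succ_eq_map, List.map_cons, List.map_map]
      congr 1
      · norm_num
      · apply List.map_congr_left; intro k _; simp [Function.comp]; try omega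
    · rw [pvPath_nil _ _ _ _ _ _ (by omega)]
      have h0 : (c + 1).toNat = 0 := by omega
      simp [h0]

-- B's wires (closed-form range map) coincide with the geometric ray, for each unit direction
lemma pvWires_eq_path (x y n dxv dyv : Int)
    (h : (dxv = 0 ∧ (dyv = 1 ∨ dyv = -1)) ∨ (dyv = 0 ∧ (dxv = 1 ∨ dxv = -1))) :
    (PySem.List.pyRange 1
        ((if dxv ≠ 0 then (if 0 ≤ y ∧ y < n then pvRayLenB x dxv n else 0)
          else (if 0 ≤ x ∧ x < n then pvRayLenB y dyv n else 0)) + 1) 1).map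
      (fun k => (x + k * dxv, y + k * dyv)) =
    pvPath (n.toNat + 1) n dxv dyv (x + dxv) (y + dyv) := by
  rw [PySem.List.pyRange_one]
  have hsimp : ∀ m : Int, (m + 1 - 1).toNat = m.toNat := by intro m; omega
  rcases h with ⟨h0, h1 | h1⟩ | ⟨h0, h1 | h1⟩ <;> subst h0 h1
  · -- dxv = 0, dyv = 1 (rightwards in y)
    rw [if_neg (by omega : ¬ ((0:Int) ≠ 0))]
    by_cases hx : 0 ≤ x ∧ x < n
    · rw [if_pos hx]
      unfold pvRayLenB
      rw [if_pos rfl]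
      by_cases hy : 0 ≤ y + 1 ∧ y + 1 < n
      · rw [if_pos hy, pvPath_right n (x + 0) (by omega) (n.toNat + 1) (y + 1) (by omega) (by omega),
          hsimp, List.map_map]
        have hlen : (n - (y + 1)).toNat = (n - 1 - y).toNat := by omega
        rw [hlen]
        apply List.map_congr_left; intro k _; simp [Function.comp]; try omega
      · rw [if_neg hy, pvPath_nil _ _ _ _ _ _ (by omega)]
        simp
    · rw [if_neg hx, pvPath_nil _ _ _ _ _ _ (by omega)]
      simp
  · -- dxv = 0, dyv = -1 (leftwards in y)
    rw [if_neg (by omega : ¬ ((0:Int) ≠ 0))]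
    by_cases hx : 0 ≤ x ∧ x < n
    · rw [if_pos hx]
      unfold pvRayLenB
      rw [if_neg (by omega : ¬ ((-1:Int) = 1))]
      by_cases hy : 0 ≤ y - 1 ∧ y - 1 < n
      · rw [if_pos hy, pvPath_left n (x + 0) (by omega) (n.toNat + 1) (y + -1) (by omega) (by omega),
          hsimp, List.map_map]
        have hlen : (y + -1 + 1).toNat = y.toNat := by omega
        rw [hlen]
        apply List.map_congr_left; intro k _; simp [Function.comp]; try omega
      · rw [if_neg hy, pvPath_nil _ _ _ _ _ _ (by omega)]
        simp
    · rw [if_neg hx, pvPath_nil _ _ _ _ _ _ (by omega)]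
      simp
  · -- dxv = 1, dyv = 0 (downwards in x)
    rw [if_pos (by omega : (1:Int) ≠ 0)]
    by_cases hy : 0 ≤ y ∧ y < n
    · rw [if_pos hy]
      unfold pvRayLenB
      rw [if_pos rfl]
      by_cases hx : 0 ≤ x + 1 ∧ x + 1 < n
      · rw [if_pos hx, pvPath_down n (y + 0) (by omega) (n.toNat + 1) (x + 1) (by omega) (by omega),
          hsimp, List.map_map]
        have hlen : (n - (x + 1)).toNat = (n - 1 - x).toNat := by omega
        rw [hlen]
        apply List.map_congr_left; intro k _; simp [Function.comp]; try omega
      · rw [if_neg hx, pvPath_nil _ _ _ _ _ _ (by omega)]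
        simp
    · rw [if_neg hy, pvPath_nil _ _ _ _ _ _ (by omega)]
      simp
  · -- dxv = -1, dyv = 0 (upwards in x)
    rw [if_pos (by omega : (-1:Int) ≠ 0)]
    by_cases hy : 0 ≤ y ∧ y < n
    · rw [if_pos hy]
      unfold pvRayLenB
      rw [if_neg (by omega : ¬ ((-1:Int) = 1))]
      by_cases hx : 0 ≤ x - 1 ∧ x - 1 < n
      · rw [if_pos hx, pvPath_up n (y + 0) (by omega) (n.toNat + 1) (x + -1) (by omega) (by omega),
          hsimp, List.map_map]
        have hlen : (x + -1 + 1).toNat = x.toNat := by omega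
        rw [hlen]
        apply List.map_congr_left; intro k _; simp [Function.comp]; try omega
      · rw [if_neg hx, pvPath_nil _ _ _ _ _ _ (by omega)]
        simp
    · rw [if_neg hy, pvPath_nil _ _ _ _ _ _ (by omega)]
      simp

-- the two ports agree for a concrete in-range direction (shared assembly step)
lemma pvMain (board : List (List Int)) (x y n dxv dyv : Int)
    (h : (dxv = 0 ∧ (dyv = 1 ∨ dyv = -1)) ∨ (dyv = 0 ∧ (dxv = 1 ∨ dxv = -1))) :
    pvLoopA (n.toNat + 1) board n dxv dyv (x + dxv) (y + dyv) [] =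
    (let m := if dxv ≠ 0 then (if 0 ≤ y ∧ y < n then pvRayLenB x dxv n else 0)
              else (if 0 ≤ x ∧ x < n then pvRayLenB y dyv n else 0)
     let wires := (PySem.List.pyRange 1 (m + 1) 1).map (fun k => (x + k * dxv, y + k * dyv))
     if wires.any (fun p => pvCellB board p.1 p.2 != 0) then ((false : Bool), ([] : List (Int × Int)))
     else (true, wires)) := by
  rw [pvLoopA_eq_path]
  simp only [List.nil_append, pvWires_eq_path x y n dxv dyv h]
  by_cases hall : (pvPath (n.toNat + 1) n dxv dyv (x + dxv) (y + dyv)).all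
      (fun p => pvCellB board p.1 p.2 == 0) = true
  · have hany : (pvPath (n.toNat + 1) n dxv dyv (x + dxv) (y + dyv)).any
        (fun p => pvCellB board p.1 p.2 != 0) = false := by
      simp only [List.all_eq_true] at hall
      simp only [List.any_eq_false]
      intro p hp; simpa using hall p hp
    simp [hall, hany]
  · have hall' : (pvPath (n.toNat + 1) n dxv dyv (x + dxv) (y + dyv)).all
        (fun p => pvCellB board p.1 p.2 == 0) = false := Bool.eq_false_iff.mpr hall
    obtain ⟨p, hp, hne⟩ := List.all_eq_false.mp hall'
    have hany : (pvPath (n.toNat + 1) n dxv dyv (x + dxv) (y + dyv)).any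
        (fun p => pvCellB board p.1 p.2 != 0) = true :=
      List.any_eq_true.mpr ⟨p, hp, by simpa using hne⟩
    simp [hall, hany]

-- ===== VERDICT (by name: the statement is the Claim_ definition above) =====
theorem can_do_spec : Claim_equal_can_do := by
  intro board x y d n _hdom hpre
  obtain ⟨⟨hd1, hd2⟩, -⟩ := hpre
  unfold Spec_can_do can_do can_do_alt
  interval_cases d
  · exact pvMain board x y n (-1) 0 (by norm_num)
  · exact pvMain board x y n 1 0 (by norm_num)
  · exact pvMain board x y n 0 (-1) (by norm_num)
  · exact pvMain board x y n 0 1 (by norm_num)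
  · exact pvMain board x y n (-1) 0 (by norm_num)
  · exact pvMain board x y n 1 0 (by norm_num)
  · exact pvMain board x y n 0 (-1) (by norm_num)
  · exact pvMain board x y n 0 1 (by norm_num)
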